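-- pv_equiv track=rewrite | github.com/c334706598/Ultracold-molecule-simulation-CUHK | coherence sim 2.py | flip_condition
-- ===== SOURCE A (Python) =====
-- def flip_condition(index1, index2, total_spin):
--     ### spin is encoded in the binary form of indices, with 1 being spin up and 0 being spin down
--     if index1 * index2 == 0 or index1 >= 2**total_spin - 1 or index2 >= 2**total_spin - 1:
--     # if all spin up or all spin down, can not flip, or invalid index
--         return False
--     else:
--         temp = index1^index2
--         # get the different spins
--         count = 0
--         count2 = 0
--         while temp != 0:
--             count += temp % 2
--             if temp % 2 == 1:
--                 count2 += index1 % 2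
--             temp //= 2
--             index1 //= 2
--         if count == 2 and count2 == 1:
--             # Only if there are two spin are different, one spin up and one spin down
--             return True
--         else:
--             return False
-- ===== SOURCE B (Python) =====
-- def flip_condition(index1, index2, total_spin):
--     # B: same guard as A, then popcount tests on bitmasks instead of the
--     # digit-by-digit while loop with two manual counters.
--     if index1 * index2 == 0 or index1 >= 2**total_spin - 1 or index2 >= 2**total_spin - 1:
--         return False
--     diff = index1 ^ index2
--     return bin(diff).count('1') == 2 and bin(index1 & diff).count('1') == 1
-- ===== Notes on version B (the rewrite author's own statement) =====
-- stated objective: simpler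
-- what changed: Replaces the digit-by-digit while loop maintaining two counters (temp //= 2, index1 //= 2) by two bit-population counts: the states differ by one swap iff popcount(index1^index2) == 2 and popcount(index1 & (index1^index2)) == 1; the guard is kept identical.
import Mathlib
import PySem

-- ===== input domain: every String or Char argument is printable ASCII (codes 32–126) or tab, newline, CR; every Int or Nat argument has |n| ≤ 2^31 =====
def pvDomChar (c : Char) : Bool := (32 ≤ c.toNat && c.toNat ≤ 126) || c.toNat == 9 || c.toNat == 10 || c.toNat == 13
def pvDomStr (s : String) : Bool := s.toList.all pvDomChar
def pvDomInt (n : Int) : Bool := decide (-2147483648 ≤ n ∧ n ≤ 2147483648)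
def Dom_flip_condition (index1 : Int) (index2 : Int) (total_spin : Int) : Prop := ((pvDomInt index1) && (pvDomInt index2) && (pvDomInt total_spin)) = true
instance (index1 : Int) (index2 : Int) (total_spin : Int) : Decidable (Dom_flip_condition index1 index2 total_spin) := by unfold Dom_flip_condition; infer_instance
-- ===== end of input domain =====

-- B replaces A's digit-by-digit while loop (two manual counters) by two bit-population
-- counts on masks; the guard clause is kept identical.  Objective: simpler.

-- Python's 'idx >= 2**total_spin - 1'.  For total_spin ≥ 0 this is exact integer
-- arithmetic.  For total_spin < 0, 2**total_spin is a float in (0,1], so the bound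
-- lies in (-1,0] and the comparison holds for an integer idx iff 0 ≤ idx.  (For
-- total_spin ≤ -54 the float bound rounds to exactly -1.0, so Python also accepts
-- idx = -1; on every such input both programs return False through either branch,
-- so the ports' values are unaffected.)
def pvGeBound (idx : Int) (ts : Int) : Bool := if 0 ≤ ts then idx ≥ 2 ^ ts.toNat - 1 else idx ≥ 0

-- ===== PORT A =====
-- the while loop: state (temp, index1, count, count2); Python loops forever when
-- temp < 0 (excluded by Pre_), so the recursion stops on 'temp ≤ 0' with whatever
-- counters it has — on 0 ≤ temp this is exactly Python's 'while temp != 0'.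
def pvLoopA (temp : Int) (index1 : Int) (count : Int) (count2 : Int) : Int × Int :=
  if 0 < temp then
    pvLoopA (PySem.Int.floordiv temp 2) (PySem.Int.floordiv index1 2)
      (count + PySem.Int.mod temp 2)
      (count2 + if PySem.Int.mod temp 2 = 1 then PySem.Int.mod index1 2 else 0)
  else (count, count2)
termination_by temp.toNat
decreasing_by
  rw [PySem.Int.floordiv_eq_ediv_of_pos (by norm_num)]
  omega

def flip_condition (index1 : Int) (index2 : Int) (total_spin : Int) : Bool :=
  if index1 * index2 == 0 || pvGeBound index1 total_spin || pvGeBound index2 total_spin then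
    false
  else
    let temp := PySem.Int.bxor index1 index2
    let r := pvLoopA temp index1 0 0
    if r.1 == 2 && r.2 == 1 then true else false

-- ===== PORT B =====
def flip_condition_alt (index1 : Int) (index2 : Int) (total_spin : Int) : Bool :=
  if index1 * index2 == 0 || pvGeBound index1 total_spin || pvGeBound index2 total_spin then
    false
  else
    let diff := PySem.Int.bxor index1 index2
    (PySem.Int.bitCount diff == 2) && (PySem.Int.bitCount (PySem.Int.band index1 diff) == 1)

-- ===== PRECONDITION & SPEC =====
-- Pre_ excludes exactly the inputs on which A never returns: two nonzero indices of
-- opposite sign that pass the guard make temp = index1^index2 negative, and Python's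
-- 'while temp != 0' with 'temp //= 2' then loops forever (temp converges to -1).
def Pre_flip_condition (index1 : Int) (index2 : Int) (total_spin : Int) : Prop :=
  (index1 < 0 ↔ index2 < 0) ∨ index1 = 0 ∨ index2 = 0 ∨
    pvGeBound index1 total_spin = true ∨ pvGeBound index2 total_spin = true
instance (index1 : Int) (index2 : Int) (total_spin : Int) : Decidable (Pre_flip_condition index1 index2 total_spin) := by unfold Pre_flip_condition; infer_instance
def pvWitness_flip_condition : Int × Int × Int := (3, 5, 3)

def Spec_flip_condition (index1 : Int) (index2 : Int) (total_spin : Int) (out : Bool) : Prop := out = flip_condition_alt index1 index2 total_spin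
instance (index1 : Int) (index2 : Int) (total_spin : Int) (out : Bool) : Decidable (Spec_flip_condition index1 index2 total_spin out) := by unfold Spec_flip_condition; infer_instance

-- ===== CLAIM (what is proved, stated in full; the proofs are below) =====
def Claim_equal_flip_condition : Prop := ∀ (index1 : Int) (index2 : Int) (total_spin : Int), Dom_flip_condition index1 index2 total_spin → Pre_flip_condition index1 index2 total_spin → Spec_flip_condition index1 index2 total_spin (flip_condition index1 index2 total_spin)

-- ===== LEMMAS AND PROOFS =====

-- one halving step of bitCount, valid also at 0
theorem pv_bc_step (x : Int) (hx : 0 ≤ x) :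
    (PySem.Int.bitCount x : Int) = PySem.Int.mod x 2 + (PySem.Int.bitCount (PySem.Int.floordiv x 2) : Int) := by
  rcases lt_or_eq_of_le hx with h | h
  · rw [PySem.Int.bitCount_of_pos h]
    push_cast
    rw [Int.toNat_of_nonneg]
    rw [PySem.Int.mod_eq_emod_of_pos (by norm_num)]
    exact Int.emod_nonneg _ (by norm_num)
  · rw [← h]; decide

-- low bit of (i & t) for 0 ≤ t, i of either sign
theorem pv_band_mod_two (i t : Int) (ht : 0 ≤ t) :
    PySem.Int.mod (PySem.Int.band i t) 2 =
      if PySem.Int.mod t 2 = 1 then PySem.Int.mod i 2 else 0 := by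
  by_cases hi : 0 ≤ i
  · unfold PySem.Int.band
    rw [if_pos hi, if_pos ht]
    have hk := @Nat.and_mod_two_eq_one i.toNat t.toNat
    rw [PySem.Int.mod_eq_emod_of_pos (by norm_num), PySem.Int.mod_eq_emod_of_pos (by norm_num),
        PySem.Int.mod_eq_emod_of_pos (by norm_num)]
    split_ifs with h <;> omega
  · unfold PySem.Int.band
    rw [if_neg hi, if_pos ht]
    have hk := @Nat.and_mod_two_eq_one t.toNat (-i - 1).toNat
    have hle : t.toNat &&& (-i - 1).toNat ≤ t.toNat := Nat.and_le_left
    rw [PySem.Int.mod_eq_emod_of_pos (by norm_num), PySem.Int.mod_eq_emod_of_pos (by norm_num),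
        PySem.Int.mod_eq_emod_of_pos (by norm_num)]
    split_ifs with h <;> omega

-- halving (i & t) for 0 ≤ t, i of either sign
theorem pv_band_half (i t : Int) (ht : 0 ≤ t) :
    PySem.Int.floordiv (PySem.Int.band i t) 2 =
      PySem.Int.band (PySem.Int.floordiv i 2) (PySem.Int.floordiv t 2) := by
  have ht2 : PySem.Int.floordiv t 2 = ((t.toNat / 2 : Nat) : Int) := by
    rw [show t = ((t.toNat : Nat) : Int) by omega]
    exact_mod_cast PySem.Int.floordiv_natCast t.toNat 2
  by_cases hi : 0 ≤ i
  · have hi2 : PySem.Int.floordiv i 2 = ((i.toNat / 2 : Nat) : Int) := by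
      rw [show i = ((i.toNat : Nat) : Int) by omega]
      exact_mod_cast PySem.Int.floordiv_natCast i.toNat 2
    unfold PySem.Int.band
    rw [if_pos hi, if_pos ht, hi2, ht2]
    rw [if_pos (by positivity), if_pos (by positivity)]
    simp only [Int.toNat_natCast]
    have e1 : PySem.Int.floordiv ((i.toNat &&& t.toNat : Nat) : Int) 2 =
        (((i.toNat &&& t.toNat : Nat) / 2 : Nat) : Int) := by
      exact_mod_cast PySem.Int.floordiv_natCast (i.toNat &&& t.toNat) 2
    rw [e1, Nat.and_div_two]
  · have hi2 : PySem.Int.floordiv i 2 = -1 - (((-i - 1).toNat / 2 : Nat) : Int) := by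
      rw [PySem.Int.floordiv_eq_iff_of_pos (by norm_num)]
      omega
    unfold PySem.Int.band
    rw [if_neg hi, if_pos ht, hi2, ht2]
    rw [if_neg (by omega), if_pos (by positivity)]
    have hle : t.toNat &&& (-i - 1).toNat ≤ t.toNat := Nat.and_le_left
    have hk := @Nat.and_mod_two_eq_one t.toNat (-i - 1).toNat
    have hdiv : (t.toNat &&& (-i - 1).toNat) / 2 = t.toNat / 2 &&& (-i - 1).toNat / 2 :=
      Nat.and_div_two
    have e1 : PySem.Int.floordiv ((t.toNat - (t.toNat &&& (-i - 1).toNat) : Nat) : Int) 2 =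
        (((t.toNat - (t.toNat &&& (-i - 1).toNat) : Nat) / 2 : Nat) : Int) := by
      exact_mod_cast PySem.Int.floordiv_natCast (t.toNat - (t.toNat &&& (-i - 1).toNat)) 2
    rw [e1]
    have e2 : (-(-1 - (((-i - 1).toNat / 2 : Nat) : Int)) - 1).toNat = (-i - 1).toNat / 2 := by omega
    rw [e2]
    simp only [Int.toNat_natCast]
    have e3 : (t.toNat - (t.toNat &&& (-i - 1).toNat)) / 2 =
        t.toNat / 2 - (t.toNat / 2 &&& (-i - 1).toNat / 2) := by omega
    rw [e3]

theorem pv_band_nonneg (i t : Int) (ht : 0 ≤ t) : 0 ≤ PySem.Int.band i t := by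
  rw [PySem.Int.band_comm]
  exact PySem.Int.band_nonneg_of_nonneg_left _ ht

theorem pv_floordiv_two_nonneg (t : Int) (ht : 0 ≤ t) : 0 ≤ PySem.Int.floordiv t 2 := by
  rw [PySem.Int.floordiv_eq_ediv_of_pos (by norm_num)]
  omega

-- the loop computes the two popcounts
theorem pvLoopA_eq (t i c c2 : Int) (ht : 0 ≤ t) :
    pvLoopA t i c c2 =
      (c + (PySem.Int.bitCount t : Int),
       c2 + (PySem.Int.bitCount (PySem.Int.band i t) : Int)) := by
  induction t, i, c, c2 using pvLoopA.induct with
  | case1 t i c c2 h ih =>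
    simp only [dite_eq_ite] at ih
    rw [pvLoopA, if_pos h]
    rw [ih (pv_floordiv_two_nonneg t (le_of_lt h))]
    have hbt : 0 ≤ PySem.Int.band i t := pv_band_nonneg i t (le_of_lt h)
    simp only [Prod.mk.injEq]
    constructor
    · rw [pv_bc_step t (le_of_lt h)]; ring
    · rw [pv_bc_step (PySem.Int.band i t) hbt, pv_band_mod_two i t (le_of_lt h),
          pv_band_half i t (le_of_lt h)]
      ring
  | case2 t i c c2 h =>
    rw [pvLoopA, if_neg h]
    have ht0 : t = 0 := by omega
    subst ht0
    simp [PySem.Int.band_zero, PySem.Int.bitCount_zero]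

-- same-signed nonzero indices xor to a nonnegative diff
theorem pv_bxor_nonneg (a b : Int) (h : a < 0 ↔ b < 0) : 0 ≤ PySem.Int.bxor a b := by
  unfold PySem.Int.bxor
  split_ifs with h1 h2 h2 <;> [positivity; omega; omega; positivity]

-- ===== VERDICT (by name: the statement is the Claim_ definition above) =====
theorem flip_condition_spec : Claim_equal_flip_condition := by
  intro index1 index2 total_spin hdom hpre
  unfold Spec_flip_condition flip_condition flip_condition_alt
  by_cases hg : (index1 * index2 == 0 || pvGeBound index1 total_spin || pvGeBound index2 total_spin) = true
  · rw [if_pos hg, if_pos hg]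
  · rw [if_neg hg, if_neg hg]
    simp only [Bool.or_eq_true, beq_iff_eq, not_or] at hg
    have hsign : index1 < 0 ↔ index2 < 0 := by
      rcases hpre with h | h | h | h | h
      · exact h
      · exact absurd (by rw [h, zero_mul]) hg.1.1
      · exact absurd (by rw [h, mul_zero]) hg.1.1
      · exact absurd h (by simpa using hg.1.2)
      · exact absurd h (by simpa using hg.2)
    have hd : 0 ≤ PySem.Int.bxor index1 index2 := pv_bxor_nonneg _ _ hsign
    have hres := pvLoopA_eq (PySem.Int.bxor index1 index2) index1 0 0 hd
    simp only [hres, zero_add]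
    have hc2 : ((PySem.Int.bitCount (PySem.Int.bxor index1 index2) : Int) = 2) ↔
        PySem.Int.bitCount (PySem.Int.bxor index1 index2) = 2 := by omega
    have hc1 : ((PySem.Int.bitCount (PySem.Int.band index1 (PySem.Int.bxor index1 index2)) : Int) = 1) ↔
        PySem.Int.bitCount (PySem.Int.band index1 (PySem.Int.bxor index1 index2)) = 1 := by omega
    rcases eq_or_ne (PySem.Int.bitCount (PySem.Int.bxor index1 index2)) 2 with h1 | h1 <;>
      rcases eq_or_ne (PySem.Int.bitCount (PySem.Int.band index1 (PySem.Int.bxor index1 index2))) 1 with h2 | h2 <;>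
        simp [h1, h2, hc1, hc2]
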